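-- pv_equiv track=rewrite | github.com/saartanel/iti0102-2019 | pr07_pyramid/pyramid.py | make_pyramid
-- ===== SOURCE A (Python) =====
-- def make_pyramid(base: int, char: str) -> list:
--     """
--     Construct a pyramid with given base.
--
--     Pyramid should consist of given chars, all empty spaces in the pyramid list are ' '.
--     Pyramid height depends on base length. Lowest floor consists of base-number chars.
--     Every floor has 2 chars less than the floor lower to it.
--     make_pyramid(3, "A") ->
--     [
--         [' ', 'A', ' '],
--         ['A', 'A', 'A']
--     ]
--     make_pyramid(6, 'a') ->
--     [
--         [' ', ' ', 'a', 'a', ' ', ' '],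
--         [' ', 'a', 'a', 'a', 'a', ' '],
--         ['a', 'a', 'a', 'a', 'a', 'a']
--     ]
--     :param base: int
--     :param char: str
--     :return: list
--     """
--     pyramid = []
--     a = base
--     b = 0
--     for i in range(base):
--         while a > 0:
--             append_line = [" " for _ in range(int(b / 2))] + [char for _ in range(a)] + [" " for _ in range(int(b / 2))]
--             a = a - 2
--             b = b + 2
--             pyramid.append(append_line)
--     pyramid.reverse()
--     return pyramid
-- ===== SOURCE B (Python) =====
-- def make_pyramid(base: int, char: str) -> list:
--     floors = (base + 1) // 2
--
--     def row(pad):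
--         return [" "] * pad + [char] * (base - 2 * pad) + [" "] * pad
--
--     return [row(floors - 1 - k) for k in range(floors)]
-- ===== Notes on version B (the rewrite author's own statement) =====
-- stated objective: simpler
-- what changed: B computes floors=(base+1)//2 up front and builds rows top-down by index (pad = floors-1-k) in one comprehension, replacing A's bottom-up while-loop with running counters nested in a redundant for-loop followed by a reverse.
import Mathlib
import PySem

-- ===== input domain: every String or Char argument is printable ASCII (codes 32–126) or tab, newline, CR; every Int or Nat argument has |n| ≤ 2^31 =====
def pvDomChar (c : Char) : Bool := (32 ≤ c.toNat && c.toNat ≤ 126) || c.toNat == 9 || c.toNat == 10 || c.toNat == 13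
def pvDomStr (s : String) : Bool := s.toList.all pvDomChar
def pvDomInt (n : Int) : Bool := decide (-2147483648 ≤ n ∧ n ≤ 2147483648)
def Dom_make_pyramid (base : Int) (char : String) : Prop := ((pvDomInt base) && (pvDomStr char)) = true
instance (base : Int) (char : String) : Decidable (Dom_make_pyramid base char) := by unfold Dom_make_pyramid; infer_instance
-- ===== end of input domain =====

-- B builds the rows top-down from a closed-form floor count instead of A's
-- bottom-up counter while-loop (inside a redundant for-loop) plus a reverse;
-- objective: simpler.

-- ===== PORT A =====
-- the 'while a > 0' body: appends one row and updates the counters a, b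
def pvWhileA (char : String) (a b : Int) (pyr : List (List String)) :
    List (List String) × Int × Int :=
  if a > 0 then
    -- append_line = [" "]*int(b/2) + [char]*a + [" "]*int(b/2)  (b is even and ≥ 0 here)
    pvWhileA char (a - 2) (b + 2)
      (pyr ++ [List.replicate ((b / 2).toNat) " " ++ List.replicate a.toNat char ++
        List.replicate ((b / 2).toNat) " "])
  else (pyr, a, b)
termination_by a.toNat
decreasing_by omega

def make_pyramid (base : Int) (char : String) : List (List String) :=
  let st := (PySem.List.pyRange 0 base 1).foldl
    (fun (st : List (List String) × Int × Int) _ => pvWhileA char st.2.1 st.2.2 st.1)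
    ([], base, 0)
  st.1.reverse

-- ===== PORT B =====
-- row pad = [" "]*pad + [char]*(base-2*pad) + [" "]*pad
def pvRowB (base : Int) (char : String) (pad : Int) : List String :=
  List.replicate pad.toNat " " ++ List.replicate (base - 2 * pad).toNat char ++
    List.replicate pad.toNat " "

def make_pyramid_alt (base : Int) (char : String) : List (List String) :=
  let floors := PySem.Int.floordiv (base + 1) 2
  (PySem.List.pyRange 0 floors 1).map (fun k => pvRowB base char (floors - 1 - k))

-- ===== PRECONDITION & SPEC =====
def Spec_make_pyramid (base : Int) (char : String) (out : List (List String)) : Prop := out = make_pyramid_alt base char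
instance (base : Int) (char : String) (out : List (List String)) : Decidable (Spec_make_pyramid base char out) := by unfold Spec_make_pyramid; infer_instance

-- ===== CLAIM (what is proved, stated in full; the proofs are below) =====
def Claim_equal_make_pyramid : Prop := ∀ (base : Int) (char : String), Dom_make_pyramid base char → Spec_make_pyramid base char (make_pyramid base char)

-- ===== LEMMAS AND PROOFS =====

-- the rows produced by the while loop, without the accumulator
def pvRows (char : String) (a b : Int) : List (List String) :=
  if a > 0 then
    (List.replicate ((b / 2).toNat) " " ++ List.replicate a.toNat char ++
      List.replicate ((b / 2).toNat) " ") :: pvRows char (a - 2) (b + 2)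
  else []
termination_by a.toNat
decreasing_by omega

theorem pvWhileA_fst (char : String) (a b : Int) (pyr : List (List String)) :
    (pvWhileA char a b pyr).1 = pyr ++ pvRows char a b := by
  induction a, b, pyr using pvWhileA.induct char with
  | case1 a b pyr h ih =>
    rw [pvWhileA, pvRows, if_pos h, if_pos h]
    simpa using ih
  | case2 a b pyr h =>
    rw [pvWhileA, pvRows, if_neg h, if_neg h]
    simp

theorem pvWhileA_nonpos (char : String) (a b : Int) (pyr : List (List String)) :
    (pvWhileA char a b pyr).2.1 ≤ 0 := by
  induction a, b, pyr using pvWhileA.induct char with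
  | case1 a b pyr h ih => rw [pvWhileA, if_pos h]; exact ih
  | case2 a b pyr h => rw [pvWhileA, if_neg h]; show a ≤ 0; omega

theorem pvFold_const (char : String) (l : List Int)
    (st : List (List String) × Int × Int) (h : st.2.1 ≤ 0) :
    l.foldl (fun (st : List (List String) × Int × Int) _ =>
      pvWhileA char st.2.1 st.2.2 st.1) st = st := by
  obtain ⟨p, a, b⟩ := st
  simp only at h
  induction l with
  | nil => rfl
  | cons x xs ih =>
    have hs : pvWhileA char a b p = (p, a, b) := by
      rw [pvWhileA, if_neg (by omega)]
    simpa [hs] using ih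

theorem pvRows_closed (char : String) (n : Nat) :
    ∀ a b : Int, a + 1 ≤ 2 * n + 1 → 2 * n - 1 ≤ a →
      pvRows char a b =
        (List.range n).map (fun k : Nat =>
          List.replicate (((b + 2 * (k : Int)) / 2).toNat) " " ++
            List.replicate (a - 2 * (k : Int)).toNat char ++
            List.replicate (((b + 2 * (k : Int)) / 2).toNat) " ") := by
  induction n with
  | zero =>
    intro a b h1 h2
    rw [pvRows, if_neg (by omega)]
    simp [List.range_zero]
  | succ m ih =>
    intro a b h1 h2
    rw [pvRows, if_pos (by omega), List.range_succ_eq_map, List.map_cons, List.map_map]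
    congr 1
    · norm_num
    · rw [ih (a - 2) (b + 2) (by omega) (by omega)]
      apply List.map_congr_left
      intro k _
      simp only [Function.comp_apply]
      have h3 : b + 2 + 2 * (k : Int) = b + 2 * ((k.succ : Nat) : Int) := by push_cast; ring
      have h4 : a - 2 - 2 * (k : Int) = a - 2 * ((k.succ : Nat) : Int) := by push_cast; ring
      rw [h3, h4]

theorem make_pyramid_eq (base : Int) (char : String) :
    make_pyramid base char = make_pyramid_alt base char := by
  by_cases hb : base ≤ 0
  · have hf : PySem.Int.floordiv (base + 1) 2 ≤ 0 := by
      rw [PySem.Int.floordiv_eq_ediv_of_pos (by omega)]; omega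
    rw [make_pyramid, make_pyramid_alt]
    rw [PySem.List.pyRange_one_eq_nil hb, PySem.List.pyRange_one_eq_nil hf]
    simp
  · rw [not_le] at hb
    -- number of floors as a Nat
    set n : Nat := ((base + 1) / 2).toNat with hn
    have hfl : PySem.Int.floordiv (base + 1) 2 = (n : Int) := by
      rw [PySem.Int.floordiv_eq_ediv_of_pos (by omega)]; omega
    have hnpos : 0 < n := by omega
    -- A side: the outer for-loop runs the while loop once, then is constant
    rw [make_pyramid]
    rw [PySem.List.pyRange_one_cons hb]
    simp only [List.foldl_cons]
    rw [pvFold_const char _ _ (pvWhileA_nonpos char base 0 [])]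
    rw [pvWhileA_fst]
    rw [pvRows_closed char n base 0 (by omega) (by omega)]
    -- B side
    rw [make_pyramid_alt, hfl, PySem.List.pyRange_one]
    simp only [List.map_map, sub_zero, Int.toNat_natCast]
    -- compare element by element
    apply List.ext_getElem
    · simp
    · intro i h1 h2
      simp only [List.getElem_reverse, List.nil_append, List.length_map,
        List.length_range, List.getElem_map, List.getElem_range]
      have hi : i < n := by simpa using h2
      have e1 : ((0 + 2 * ((n - 1 - i : Nat) : Int)) / 2).toNat = n - 1 - i := by omega
      have e2 : (base - 2 * ((n - 1 - i : Nat) : Int)).toNat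
          = (base - 2 * ((n : Int) - 1 - (0 + (i : Int)))).toNat := by omega
      have e3 : ((n : Int) - 1 - (0 + (i : Int))).toNat = n - 1 - i := by omega
      simp only [pvRowB, Function.comp_apply]
      rw [e1, e2, e3]

-- ===== VERDICT (by name: the statement is the Claim_ definition above) =====
theorem make_pyramid_spec : Claim_equal_make_pyramid := by
  intro base char _
  unfold Spec_make_pyramid
  exact make_pyramid_eq base char
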